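-- pv_equiv track=rewrite | github.com/microsoft/intelligence-toolkit | toolkit/query_text_data/pattern_detector.py | _get_ranks_from_counts
-- ===== SOURCE A (Python) =====
-- from collections import defaultdict
--
-- def _get_ranks_from_counts(node_period_counts, node_edge_counts):
--     node_period_ranks = defaultdict(lambda: defaultdict(int))
--     edge_period_ranks = defaultdict(lambda: defaultdict(int))
--
--     def assign_ranks(period_counts):
--         sorted_periods = sorted(period_counts.items(), key=lambda x: x[1], reverse=True)
--         ranks = {}
--         current_rank = 1
--         for i, (period, count) in enumerate(sorted_periods):
--             if i > 0 and count < sorted_periods[i - 1][1]: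
--                 current_rank = i + 1
--             ranks[period] = current_rank
--         return ranks
--
--     for node, period_counts in node_period_counts.items():
--         ranks = assign_ranks(period_counts)
--         for period, rank in ranks.items():
--             node_period_ranks[node][period] = rank
--
--     for edge, period_counts in node_edge_counts.items():
--         ranks = assign_ranks(period_counts)
--         for period, rank in ranks.items():
--             edge_period_ranks[edge][period] = rank
--
--     return node_period_ranks, edge_period_ranks
-- ===== SOURCE B (Python) =====
-- from collections import defaultdict
--
-- def _get_ranks_from_counts(node_period_counts, node_edge_counts):
--     node_period_ranks = defaultdict(lambda: defaultdict(int))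
--     edge_period_ranks = defaultdict(lambda: defaultdict(int))
--
--     def ranks_of(period_counts):
--         # competition rank directly: 1 + number of periods with a strictly
--         # greater count; sorted only to emit periods in descending-count order
--         return {
--             p: 1 + sum(v > c for v in period_counts.values())
--             for p, c in sorted(period_counts.items(), key=lambda x: x[1], reverse=True)
--         }
--
--     for node, period_counts in node_period_counts.items():
--         if period_counts:
--             node_period_ranks[node] = defaultdict(int, ranks_of(period_counts))
--
--     for edge, period_counts in node_edge_counts.items():
--         if period_counts:
--             edge_period_ranks[edge] = defaultdict(int, ranks_of(period_counts))
--
--     return node_period_ranks, edge_period_ranks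
-- ===== Notes on version B (the rewrite author's own statement) =====
-- stated objective: simpler
-- what changed: Replaces A's stateful sorted-scan (enumerate index, previous-count and current_rank bookkeeping) with the direct competition-rank formula rank(p) = 1 + number of strictly greater counts, computed per period, and writes each group's rank dict in one assignment instead of period-by-period defaultdict writes.
import Mathlib
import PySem

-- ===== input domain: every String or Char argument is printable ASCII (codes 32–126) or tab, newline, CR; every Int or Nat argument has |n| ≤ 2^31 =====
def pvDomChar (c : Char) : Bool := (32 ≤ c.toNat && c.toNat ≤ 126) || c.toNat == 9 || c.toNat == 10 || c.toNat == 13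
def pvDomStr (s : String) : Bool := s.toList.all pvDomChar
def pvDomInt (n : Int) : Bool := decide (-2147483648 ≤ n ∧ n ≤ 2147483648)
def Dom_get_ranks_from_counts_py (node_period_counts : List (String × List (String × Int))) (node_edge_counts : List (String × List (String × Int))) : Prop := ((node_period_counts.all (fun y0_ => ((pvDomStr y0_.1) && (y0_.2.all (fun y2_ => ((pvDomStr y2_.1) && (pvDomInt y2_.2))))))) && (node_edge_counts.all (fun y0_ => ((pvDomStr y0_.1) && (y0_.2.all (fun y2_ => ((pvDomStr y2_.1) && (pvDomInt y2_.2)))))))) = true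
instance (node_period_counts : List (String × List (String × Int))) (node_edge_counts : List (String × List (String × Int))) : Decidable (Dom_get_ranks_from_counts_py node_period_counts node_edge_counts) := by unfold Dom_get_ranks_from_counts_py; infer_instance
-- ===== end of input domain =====

-- B replaces A's sorted-scan rank bookkeeping (current_rank/previous-count state) by the direct
-- competition-rank formula "1 + number of strictly greater counts"; objective: simpler.
-- Equivalence is about the RETURN value; neither program mutates its arguments.

-- ===== PORT A =====
-- A's assign_ranks loop: enumerate over the count-descending-sorted items, carrying the
-- enumeration index i, the previous count and the current rank.
def pvRankLoopA : List (String × Int) → Nat → Int → Int → List (String × Int)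
  | [], _, _, _ => []
  | x :: rest, i, prev, cur =>
    let cur' := if 0 < i ∧ x.2 < prev then (i : Int) + 1 else cur
    (x.1, cur') :: pvRankLoopA rest (i + 1) x.2 cur'

def pvAssignRanksA (pc : List (String × Int)) : List (String × Int) :=
  pvRankLoopA (PySem.List.sorted pc (fun x => x.2) true) 0 0 1

-- `d[p] = r` on an inner dict modelled as an association list (overwrite in place, new key appends)
def pvDSet : List (String × Int) → String → Int → List (String × Int)
  | [], p, r => [(p, r)]
  | (q, v) :: rest, p, r => if q = p then (q, r) :: rest else (q, v) :: pvDSet rest p r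

-- `dd[n][p] = r` on the outer defaultdict: the key n is materialised on first write
def pvDDSet : List (String × List (String × Int)) → String → String → Int → List (String × List (String × Int))
  | [], n, p, r => [(n, [(p, r)])]
  | (k, inner) :: rest, n, p, r =>
    if k = n then (k, pvDSet inner p r) :: rest else (k, inner) :: pvDDSet rest n p r

-- one of A's two identical outer loops (A calls assign_ranks per key, then writes rank by rank)
def pvOuterA (xs : List (String × List (String × Int))) : List (String × List (String × Int)) :=
  xs.foldl (fun acc npc =>
    (pvAssignRanksA npc.2).foldl (fun a2 pr => pvDDSet a2 npc.1 pr.1 pr.2) acc) []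

def get_ranks_from_counts_py (node_period_counts : List (String × List (String × Int))) (node_edge_counts : List (String × List (String × Int))) : (List (String × List (String × Int))) × (List (String × List (String × Int))) :=
  (pvOuterA node_period_counts, pvOuterA node_edge_counts)

-- ===== PORT B =====
-- B's ranks_of: rank of p is 1 + the number of strictly greater counts, emitted in
-- descending-count order (dict comprehension over the sorted items)
def pvRanksOfB (pc : List (String × Int)) : List (String × Int) :=
  (PySem.List.sorted pc (fun x => x.2) true).map
    (fun x => (x.1, 1 + (pc.map (fun y => if x.2 < y.2 then (1 : Int) else 0)).sum))

-- B's outer loop: one whole-group write per nonempty group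
def pvOuterB (xs : List (String × List (String × Int))) : List (String × List (String × Int)) :=
  xs.foldl (fun acc npc => if npc.2.isEmpty then acc else acc ++ [(npc.1, pvRanksOfB npc.2)]) []

def get_ranks_from_counts_py_alt (node_period_counts : List (String × List (String × Int))) (node_edge_counts : List (String × List (String × Int))) : (List (String × List (String × Int))) × (List (String × List (String × Int))) :=
  (pvOuterB node_period_counts, pvOuterB node_edge_counts)

-- ===== PRECONDITION & SPEC =====
-- Pre_ only demands distinct keys at both levels: the Python arguments are dicts, whose
-- association-list images can never carry a duplicate key, so nothing A accepts is excluded.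
def Pre_get_ranks_from_counts_py (node_period_counts : List (String × List (String × Int))) (node_edge_counts : List (String × List (String × Int))) : Prop :=
  ((node_period_counts.map (fun z => z.1)).Nodup ∧ ∀ pr ∈ node_period_counts, (pr.2.map (fun y => y.1)).Nodup) ∧
  ((node_edge_counts.map (fun z => z.1)).Nodup ∧ ∀ pr ∈ node_edge_counts, (pr.2.map (fun y => y.1)).Nodup)
instance (node_period_counts : List (String × List (String × Int))) (node_edge_counts : List (String × List (String × Int))) : Decidable (Pre_get_ranks_from_counts_py node_period_counts node_edge_counts) := by unfold Pre_get_ranks_from_counts_py; infer_instance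

def pvWitness_get_ranks_from_counts_py : (List (String × List (String × Int))) × (List (String × List (String × Int))) :=
  ([("a", [("p", 2), ("q", 2), ("r", 1)])], [("a-b", [("p", 5)])])

def Spec_get_ranks_from_counts_py (node_period_counts : List (String × List (String × Int))) (node_edge_counts : List (String × List (String × Int))) (out : (List (String × List (String × Int))) × (List (String × List (String × Int)))) : Prop := out = get_ranks_from_counts_py_alt node_period_counts node_edge_counts
instance (node_period_counts : List (String × List (String × Int))) (node_edge_counts : List (String × List (String × Int))) (out : (List (String × List (String × Int))) × (List (String × List (String × Int)))) : Decidable (Spec_get_ranks_from_counts_py node_period_counts node_edge_counts out) := by unfold Spec_get_ranks_from_counts_py; infer_instance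

-- ===== CLAIM (what is proved, stated in full; the proofs are below) =====
def Claim_equal_get_ranks_from_counts_py : Prop := ∀ (node_period_counts : List (String × List (String × Int))) (node_edge_counts : List (String × List (String × Int))), Dom_get_ranks_from_counts_py node_period_counts node_edge_counts → Pre_get_ranks_from_counts_py node_period_counts node_edge_counts → Spec_get_ranks_from_counts_py node_period_counts node_edge_counts (get_ranks_from_counts_py node_period_counts node_edge_counts)

-- ===== LEMMAS AND PROOFS =====

-- writing a fresh period key appends it to the inner dict
theorem pvDSet_fresh (inner : List (String × Int)) (p : String) (r : Int)
    (h : p ∉ inner.map (fun y => y.1)) : pvDSet inner p r = inner ++ [(p, r)] := by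
  induction inner with
  | nil => rfl
  | cons x rest ih =>
    simp only [List.map_cons, List.mem_cons, not_or] at h
    cases x with
    | mk q v =>
      simp only [pvDSet]
      rw [if_neg (fun hh => h.1 hh.symm), ih h.2]
      rfl

-- writing under a fresh node key appends a new singleton entry
theorem pvDDSet_fresh (acc : List (String × List (String × Int))) (n p : String) (r : Int)
    (h : n ∉ acc.map (fun z => z.1)) : pvDDSet acc n p r = acc ++ [(n, [(p, r)])] := by
  induction acc with
  | nil => rfl
  | cons x rest ih =>
    simp only [List.map_cons, List.mem_cons, not_or] at h
    cases x with
    | mk k inner =>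
      simp only [pvDDSet]
      rw [if_neg (fun hh => h.1 hh.symm), ih h.2]
      rfl

-- writing under the last (just materialised) node key updates only its inner dict
theorem pvDDSet_last (acc : List (String × List (String × Int))) (n : String)
    (inner : List (String × Int)) (p : String) (r : Int)
    (h : n ∉ acc.map (fun z => z.1)) :
    pvDDSet (acc ++ [(n, inner)]) n p r = acc ++ [(n, pvDSet inner p r)] := by
  induction acc with
  | nil => simp [pvDDSet]
  | cons x rest ih =>
    simp only [List.map_cons, List.mem_cons, not_or] at h
    cases x with
    | mk k i2 =>
      simp only [List.cons_append, pvDDSet]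
      rw [if_neg (fun hh => h.1 hh.symm), ih h.2]

-- the per-period write loop fills the node's (fresh) inner dict left to right
theorem foldl_pvDDSet_mid (rest : List (String × Int)) :
    ∀ (partial_ : List (String × Int)) (acc : List (String × List (String × Int))) (n : String),
    n ∉ acc.map (fun z => z.1) →
    ((partial_ ++ rest).map (fun y => y.1)).Nodup →
    rest.foldl (fun a2 pr => pvDDSet a2 n pr.1 pr.2) (acc ++ [(n, partial_)]) =
      acc ++ [(n, partial_ ++ rest)] := by
  induction rest with
  | nil => intro partial_ acc n _ _; simp
  | cons pr rest' ih =>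
    intro partial_ acc n hn hnd
    simp only [List.foldl_cons]
    rw [pvDDSet_last acc n partial_ pr.1 pr.2 hn]
    have hfresh : pr.1 ∉ partial_.map (fun y => y.1) := by
      intro hmem
      rw [List.map_append, List.map_cons] at hnd
      exact (List.disjoint_of_nodup_append hnd) hmem (by simp)
    rw [pvDSet_fresh partial_ pr.1 pr.2 hfresh]
    have hnd' : ((partial_ ++ [pr] ++ rest').map (fun y => y.1)).Nodup := by
      simpa [List.append_assoc] using hnd
    have h2 := ih (partial_ ++ [pr]) acc n hn hnd'
    rw [h2, List.append_assoc, List.singleton_append]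

-- A's write loop for one key: no entry for an empty rank dict, else one whole entry
theorem foldl_pvDDSet (ranks : List (String × Int)) (acc : List (String × List (String × Int))) (n : String)
    (hn : n ∉ acc.map (fun z => z.1)) (hnd : (ranks.map (fun y => y.1)).Nodup) :
    ranks.foldl (fun a2 pr => pvDDSet a2 n pr.1 pr.2) acc =
      if ranks.isEmpty then acc else acc ++ [(n, ranks)] := by
  cases ranks with
  | nil => rfl
  | cons r0 rest =>
    simp only [List.isEmpty_cons, Bool.false_eq_true, if_false, List.foldl_cons]
    rw [pvDDSet_fresh acc n r0.1 r0.2 hn]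
    have := foldl_pvDDSet_mid rest [r0] acc n hn (by simpa using hnd)
    simpa using this

-- the heart: A's current_rank scan over the descending-sorted list assigns
-- 1 + (number of strictly greater counts in the whole list)
theorem pvRankLoopA_eq (full : List (String × Int)) (hdesc : full.Pairwise (fun a b => b.2 ≤ a.2))
    (l : List (String × Int)) :
    ∀ (pre : List (String × Int)) (prev cur : Int),
    full = pre ++ l →
    (∀ y ∈ pre, prev ≤ y.2) →
    (∀ y ∈ l, y.2 ≤ prev) →
    cur = 1 + (full.countP (fun y => prev < y.2) : Int) →
    pre ≠ [] →
    pvRankLoopA l pre.length prev cur =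
      l.map (fun x => (x.1, 1 + (full.countP (fun y => x.2 < y.2) : Int))) := by
  induction l with
  | nil => intro pre prev cur _ _ _ _ _; rfl
  | cons x rest ih =>
    intro pre prev cur hfull hpre hprevl hcur hpre0
    have hxle : x.2 ≤ prev := hprevl x (by simp)
    have hlen : 0 < pre.length := List.length_pos_iff.mpr hpre0
    have hldesc : (x :: rest).Pairwise (fun a b => b.2 ≤ a.2) :=
      hdesc.sublist (by rw [hfull]; exact List.sublist_append_right _ _)
    have hrest : ∀ y ∈ rest, y.2 ≤ x.2 := fun y hy => (List.pairwise_cons.mp hldesc).1 y hy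
    have hcount : (1 : Int) + (full.countP (fun y => x.2 < y.2) : Int) =
        if 0 < pre.length ∧ x.2 < prev then (pre.length : Int) + 1 else cur := by
      by_cases hlt : x.2 < prev
      · rw [if_pos ⟨hlen, hlt⟩]
        have h1 : pre.countP (fun y => x.2 < y.2) = pre.length :=
          List.countP_eq_length.mpr (fun y hy => by
            simp only [decide_eq_true_eq]
            exact lt_of_lt_of_le hlt (hpre y hy))
        have h2 : (x :: rest).countP (fun y => x.2 < y.2) = 0 :=
          List.countP_eq_zero.mpr (fun y hy => by
            simp only [decide_eq_true_eq, not_lt]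
            rcases List.mem_cons.mp hy with h | h
            · simp [h]
            · exact hrest y h)
        rw [hfull, List.countP_append, h1, h2]
        push_cast; ring
      · rw [if_neg (by tauto)]
        have hx : x.2 = prev := le_antisymm hxle (not_lt.mp hlt)
        rw [hcur, hx]
    have hfull' : full = (pre ++ [x]) ++ rest := by rw [hfull, List.append_assoc]; rfl
    have hpre' : ∀ y ∈ pre ++ [x], x.2 ≤ y.2 := by
      intro y hy
      rcases List.mem_append.mp hy with h | h
      · exact le_trans hxle (hpre y h)
      · simp only [List.mem_singleton] at h; simp [h]
    have htail := ih (pre ++ [x]) x.2 (1 + (full.countP (fun y => x.2 < y.2) : Int))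
      hfull' hpre' hrest rfl (by simp)
    simp only [List.length_append, List.length_cons, List.length_nil, Nat.zero_add] at htail
    simp only [pvRankLoopA, List.map_cons]
    rw [← hcount, htail]

-- the two rank computations agree on every group
theorem pvAssignRanksA_eq (pc : List (String × Int)) : pvAssignRanksA pc = pvRanksOfB pc := by
  have hsum : ∀ c : Int, (pc.map (fun y => if c < y.2 then (1 : Int) else 0)).sum =
      ((PySem.List.sorted pc (fun x => x.2) true).countP (fun y => decide (c < y.2)) : Int) := by
    intro c
    have h1 := PySem.List.sum_map_ite_one_zero (fun y : String × Int => decide (c < y.2)) pc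
    have h2 := (PySem.List.sorted_perm pc (fun x => x.2) true).countP_eq (fun y : String × Int => decide (c < y.2))
    simp only [decide_eq_true_eq] at h1
    rw [h1, h2]
  unfold pvRanksOfB
  simp only [hsum]
  unfold pvAssignRanksA
  generalize hsp : PySem.List.sorted pc (fun x => x.2) true = sp
  have hdesc : sp.Pairwise (fun a b => b.2 ≤ a.2) := by
    rw [← hsp]; exact PySem.List.sorted_pairwise_rev pc (fun x => x.2)
  cases sp with
  | nil => rfl
  | cons x rest =>
    have hrest : ∀ y ∈ rest, y.2 ≤ x.2 := fun y hy => (List.pairwise_cons.mp hdesc).1 y hy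
    have hc0 : (x :: rest).countP (fun y => x.2 < y.2) = 0 :=
      List.countP_eq_zero.mpr (fun y hy => by
        simp only [decide_eq_true_eq, not_lt]
        rcases List.mem_cons.mp hy with h | h
        · simp [h]
        · exact hrest y h)
    have htail := pvRankLoopA_eq (x :: rest) hdesc rest [x] x.2 1
      rfl (by simp) hrest (by rw [hc0]; simp) (by simp)
    simp only [List.length_cons, List.length_nil, Nat.zero_add] at htail
    simp only [pvRankLoopA, List.map_cons]
    rw [if_neg (by simp), htail, hc0]
    simp

-- one outer loop: A's per-period defaultdict writes equal B's one whole-entry append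
theorem pvOuter_eq_aux (xs : List (String × List (String × Int))) :
    ∀ acc : List (String × List (String × Int)),
    (xs.map (fun z => z.1)).Nodup →
    (∀ pr ∈ xs, (pr.2.map (fun y => y.1)).Nodup) →
    (∀ n ∈ xs.map (fun z => z.1), n ∉ acc.map (fun z => z.1)) →
    xs.foldl (fun acc npc =>
      (pvAssignRanksA npc.2).foldl (fun a2 pr => pvDDSet a2 npc.1 pr.1 pr.2) acc) acc =
    xs.foldl (fun acc npc => if npc.2.isEmpty then acc else acc ++ [(npc.1, pvRanksOfB npc.2)]) acc := by
  induction xs with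
  | nil => intro acc _ _ _; rfl
  | cons npc rest ih =>
    intro acc hnd hinner hfresh
    simp only [List.foldl_cons]
    have hn : npc.1 ∉ acc.map (fun z => z.1) := hfresh npc.1 (by simp)
    have hkeys : (pvAssignRanksA npc.2).map (fun y => y.1) =
        (PySem.List.sorted npc.2 (fun x => x.2) true).map (fun y => y.1) := by
      rw [pvAssignRanksA_eq]
      unfold pvRanksOfB
      rw [List.map_map]
      rfl
    have hranksnd : ((pvAssignRanksA npc.2).map (fun y => y.1)).Nodup := by
      rw [hkeys]
      have hperm := (PySem.List.sorted_perm npc.2 (fun x => x.2) true).map (fun y : String × Int => y.1)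
      exact hperm.nodup_iff.mpr (hinner npc (by simp))
    rw [foldl_pvDDSet (pvAssignRanksA npc.2) acc npc.1 hn hranksnd]
    have hek : (pvAssignRanksA npc.2).isEmpty = npc.2.isEmpty := by
      have hlen : (pvAssignRanksA npc.2).length = npc.2.length := by
        have h1 : (pvAssignRanksA npc.2).length =
            (PySem.List.sorted npc.2 (fun x => x.2) true).length := by
          have := congrArg List.length hkeys
          simpa using this
        rw [h1, (PySem.List.sorted_perm npc.2 (fun x => x.2) true).length_eq]
      cases h : pvAssignRanksA npc.2 <;> cases h2 : npc.2 <;> rw [h, h2] at hlen <;> simp_all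
    rw [hek, pvAssignRanksA_eq]
    have hnd' : (rest.map (fun z => z.1)).Nodup := (List.nodup_cons.mp hnd).2
    have hinner' : ∀ pr ∈ rest, (pr.2.map (fun y => y.1)).Nodup :=
      fun pr hpr => hinner pr (by simp [hpr])
    by_cases he : npc.2.isEmpty
    · rw [if_pos he]
      exact ih acc hnd' hinner' (fun n hnmem => hfresh n (by simp [hnmem]))
    · rw [if_neg he]
      apply ih _ hnd' hinner'
      intro n hnmem
      simp only [List.map_append, List.mem_append, not_or]
      refine ⟨hfresh n (by simp [hnmem]), ?_⟩
      simp only [List.map_cons, List.map_nil, List.mem_singleton]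
      intro hcontra
      have hh := (List.nodup_cons.mp hnd).1
      simp only [hcontra] at hnmem
      exact hh hnmem

theorem pvOuter_eq (xs : List (String × List (String × Int)))
    (hnd : (xs.map (fun z => z.1)).Nodup)
    (hinner : ∀ pr ∈ xs, (pr.2.map (fun y => y.1)).Nodup) :
    pvOuterA xs = pvOuterB xs :=
  pvOuter_eq_aux xs [] hnd hinner (by simp)

-- ===== VERDICT (by name: the statement is the Claim_ definition above) =====
theorem get_ranks_from_counts_py_spec : Claim_equal_get_ranks_from_counts_py := by
  intro a b _ hpre
  unfold Spec_get_ranks_from_counts_py get_ranks_from_counts_py get_ranks_from_counts_py_alt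
  obtain ⟨⟨h1, h2⟩, ⟨h3, h4⟩⟩ := hpre
  rw [pvOuter_eq a h1 h2, pvOuter_eq b h3 h4]
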